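-- pv_equiv track=rewrite | github.com/RynuRen/BOJ_Answer | 프로그래머스/unrated/155652. 둘만의 암호/둘만의 암호.py | solution
-- ===== SOURCE A (Python) =====
-- from string import ascii_lowercase
--
-- def solution(s, skip, index):
--     answer = ''
--     alpha = set(ascii_lowercase) - set(skip)
--     alpha_dic = {k:v for v, k in enumerate(sorted(list(alpha)))}
--     alpha_rev = {k:v for v, k in alpha_dic.items()}
--     for a in s:
--         answer += alpha_rev[(alpha_dic[a] + index) % len(alpha)]
--     return answer
-- ===== SOURCE B (Python) =====
-- from string import ascii_lowercase
--
--
-- def solution(s, skip, index):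
--     skipset = set(skip)
--     m = len([ch for ch in ascii_lowercase if ch not in skipset])
--     out = []
--     for c in s:
--         k = index % m
--         pos = ascii_lowercase.index(c)
--         if k == 0:
--             out.append(c)
--         else:
--             for ch in (ascii_lowercase + ascii_lowercase)[pos + 1:]:
--                 if ch not in skipset:
--                     k -= 1
--                     if k == 0:
--                         out.append(ch)
--                         break
--     return ''.join(out)
-- ===== Notes on version B (the rewrite author's own statement) =====
-- stated objective: alternative
-- what changed: A builds a reduced alphabet with two dictionaries (char->rank and rank->char) and decodes by modular rank lookup; B builds nothing: for each character it reduces the shift modulo the count of usable letters and then walks letter by letter through a doubled alphabet starting just after the character, counting only non-skipped letters.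
import Mathlib
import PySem

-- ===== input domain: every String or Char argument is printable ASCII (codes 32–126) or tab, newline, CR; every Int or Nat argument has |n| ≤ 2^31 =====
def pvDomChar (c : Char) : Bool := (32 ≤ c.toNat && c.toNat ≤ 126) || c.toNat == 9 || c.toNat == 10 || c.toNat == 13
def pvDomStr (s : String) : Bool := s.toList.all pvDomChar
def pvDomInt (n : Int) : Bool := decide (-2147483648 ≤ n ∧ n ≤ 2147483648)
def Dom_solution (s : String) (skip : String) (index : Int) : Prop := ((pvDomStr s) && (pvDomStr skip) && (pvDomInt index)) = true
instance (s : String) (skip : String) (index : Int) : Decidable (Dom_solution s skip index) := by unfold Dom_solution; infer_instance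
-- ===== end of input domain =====

-- B replaces A's two dictionaries over a sorted reduced alphabet by a per-character walk
-- through a doubled alphabet (shift reduced modulo the count of usable letters): an
-- alternative algorithm of similar cost, no speed claim.

-- ===== PORT A =====
-- string.ascii_lowercase
def pvAZ : List Char := "abcdefghijklmnopqrstuvwxyz".toList

def solution (s : String) (skip : String) (index : Int) : String :=
  let alpha : PySem.Set Char := PySem.Set.diff (PySem.Set.ofList pvAZ) (PySem.Set.ofList skip.toList)
  let sortedAlpha : List Char := PySem.List.sorted alpha (fun c => c) false
  let alphaDic : PySem.Dict Char Int :=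
    (PySem.List.enumerate sortedAlpha 0).foldl (fun d p => d.insert p.2 p.1) PySem.Dict.empty
  let alphaRev : PySem.Dict Int Char :=
    alphaDic.items.foldl (fun d p => d.insert p.2 p.1) PySem.Dict.empty
  String.mk (s.toList.foldl (fun ans a =>
    -- alpha_dic[a]: a missing key is a KeyError (excluded by Pre_solution)
    (alphaDic.get? a).elim ans (fun i =>
      (alphaRev.get? (PySem.Int.mod (i + index) (PySem.Set.len alpha))).elim ans
        (fun ch => ans ++ [ch]))) [])

-- ===== PORT B =====
-- the inner 'for ch in …: if ch not in skipset: k -= 1; if k == 0: append(ch); break' loop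
def pvPick (skipset : PySem.Set Char) : List Char → Nat → Option Char
  | [], _ => none
  | ch :: rest, k =>
    if PySem.Set.contains skipset ch then pvPick skipset rest k
    else if k - 1 = 0 then some ch else pvPick skipset rest (k - 1)

def solution_alt (s : String) (skip : String) (index : Int) : String :=
  let skipset : PySem.Set Char := PySem.Set.ofList skip.toList
  let m : Int := (pvAZ.filter (fun ch => !(PySem.Set.contains skipset ch))).length
  String.mk (s.toList.foldl (fun out c =>
    let k := PySem.Int.mod index m
    -- ascii_lowercase.index(c): a ValueError on a non-lowercase character (outside Pre_solution)
    (PySem.List.index? pvAZ c).elim out (fun pos =>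
      if k = 0 then out ++ [c]
      else
        -- the inner loop ending without a break appends nothing (never happens under Pre_solution)
        (pvPick skipset (PySem.List.slice (pvAZ ++ pvAZ) (some ((pos + 1 : Nat) : Int)) none) k.toNat).elim
          out (fun ch => out ++ [ch]))) [])

-- ===== PRECONDITION & SPEC =====
-- Pre_ excludes exactly the inputs where A raises: a KeyError when some character of s is
-- not a lowercase letter or is one of the skipped letters (this also rules out the
-- ZeroDivisionError case of an empty reduced alphabet with non-empty s).
def Pre_solution (s : String) (skip : String) (index : Int) : Prop :=
  (s.toList.all (fun c => pvAZ.contains c && !(skip.toList.contains c))) = true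
instance (s : String) (skip : String) (index : Int) : Decidable (Pre_solution s skip index) := by
  unfold Pre_solution; infer_instance

def pvWitness_solution : String × String × Int := ("hello", "x", 5)

def Spec_solution (s : String) (skip : String) (index : Int) (out : String) : Prop := out = solution_alt s skip index
instance (s : String) (skip : String) (index : Int) (out : String) : Decidable (Spec_solution s skip index out) := by unfold Spec_solution; infer_instance

-- ===== CLAIM (what is proved, stated in full; the proofs are below) =====
def Claim_equal_solution : Prop := ∀ (s : String) (skip : String) (index : Int), Dom_solution s skip index → Pre_solution s skip index → Spec_solution s skip index (solution s skip index)

-- ===== LEMMAS AND PROOFS =====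

-- the membership predicate both programs test, and the reduced alphabet
def pvP (skip : List Char) (c : Char) : Bool := !(skip.contains c)
def pvL (skip : List Char) : List Char := pvAZ.filter (pvP skip)

lemma pvAZ_nodup : pvAZ.Nodup := by decide

lemma pvAZ_pairwise : pvAZ.Pairwise (· < ·) := by decide

lemma pvSet_ofList_AZ : PySem.Set.ofList pvAZ = pvAZ := by decide

lemma pvContains_ofList (skip : List Char) (c : Char) :
    PySem.Set.contains (PySem.Set.ofList skip) c = skip.contains c := by
  simp only [PySem.Set.contains]
  rw [Bool.eq_iff_iff]
  simp [PySem.Set.mem_ofList]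

lemma pvAlpha_eq (skip : List Char) :
    PySem.Set.diff (PySem.Set.ofList pvAZ) (PySem.Set.ofList skip) = pvL skip := by
  rw [pvSet_ofList_AZ]
  simp only [PySem.Set.diff, pvL]
  exact List.filter_congr (fun c _ => by rw [pvContains_ofList]; rfl)

lemma pvL_nodup (skip : List Char) : (pvL skip).Nodup := pvAZ_nodup.filter _

lemma pvSorted_eq (skip : List Char) :
    PySem.List.sorted (pvL skip) (fun c => c) false = pvL skip := by
  apply PySem.List.sorted_eq_self_of_pairwise
  exact (pvAZ_pairwise.filter _).imp le_of_lt

lemma pvDic_items (L : List Char) (h : L.Nodup) :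
    ((PySem.List.enumerate L 0).foldl (fun d p => d.insert p.2 p.1) PySem.Dict.empty).items
      = (PySem.List.enumerate L 0).map (fun p => (p.2, p.1)) := by
  have h0 : ∀ a ∈ PySem.List.enumerate L 0,
      (PySem.Dict.empty : PySem.Dict Char Int).contains ((fun p : Int × Char => p.2) a) = false :=
    fun a _ => PySem.Dict.contains_empty _
  have h1 : ((PySem.List.enumerate L 0).map (fun p : Int × Char => p.2)).Nodup := by
    rw [PySem.List.map_snd_enumerate]; exact h
  have := PySem.Dict.items_foldl_insert_fresh (PySem.List.enumerate L 0)
    (fun p : Int × Char => p.2) (fun p : Int × Char => p.1) PySem.Dict.empty h0 h1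
  simpa using this

lemma pvDic_keys_nodup (L : List Char) (h : L.Nodup) :
    ((PySem.List.enumerate L 0).foldl (fun d p => d.insert p.2 p.1) PySem.Dict.empty).keys.Nodup := by
  simp only [PySem.Dict.keys, pvDic_items L h, List.map_map, Function.comp_def]
  have : (PySem.List.enumerate L 0).map (fun p : Int × Char => p.2) = L :=
    PySem.List.map_snd_enumerate L 0
  simpa [this] using h

lemma pvDic_get (L : List Char) (h : L.Nodup) (i : Nat) (hi : i < L.length) :
    ((PySem.List.enumerate L 0).foldl (fun d p => d.insert p.2 p.1) PySem.Dict.empty).get? L[i]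
      = some (i : Int) := by
  apply PySem.Dict.get?_of_mem_items
  · rw [pvDic_items L h]
    refine List.mem_map.mpr ⟨((i : Int), L[i]), ?_, rfl⟩
    rw [PySem.List.mem_enumerate_iff]
    exact ⟨i, hi, by simp⟩
  · exact pvDic_keys_nodup L h

lemma pvEnum_fst_nodup (L : List Char) : ((PySem.List.enumerate L 0).map (fun p => p.1)).Nodup := by
  have := PySem.List.pairwise_lt_enumerate L (0 : Int)
  exact List.pairwise_map.mpr (this.imp (fun h => ne_of_lt h))

lemma pvRev_items (L : List Char) (h : L.Nodup) :
    ((((PySem.List.enumerate L 0).foldl (fun d p => d.insert p.2 p.1) PySem.Dict.empty)).items.foldl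
        (fun d p => d.insert p.2 p.1) PySem.Dict.empty).items
      = PySem.List.enumerate L 0 := by
  rw [pvDic_items L h]
  have h0 : ∀ a ∈ (PySem.List.enumerate L 0).map (fun p => (p.2, p.1)),
      (PySem.Dict.empty : PySem.Dict Int Char).contains ((fun p : Char × Int => p.2) a) = false :=
    fun a _ => PySem.Dict.contains_empty _
  have h1 : (((PySem.List.enumerate L 0).map (fun p => (p.2, p.1))).map (fun p : Char × Int => p.2)).Nodup := by
    simpa [List.map_map, Function.comp_def] using pvEnum_fst_nodup L
  have := PySem.Dict.items_foldl_insert_fresh ((PySem.List.enumerate L 0).map (fun p => (p.2, p.1)))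
    (fun p : Char × Int => p.2) (fun p : Char × Int => p.1) PySem.Dict.empty h0 h1
  simpa [List.map_map, Function.comp_def] using this

lemma pvRev_get (L : List Char) (h : L.Nodup) (t : Nat) (ht : t < L.length) :
    ((((PySem.List.enumerate L 0).foldl (fun d p => d.insert p.2 p.1) PySem.Dict.empty)).items.foldl
        (fun d p => d.insert p.2 p.1) PySem.Dict.empty).get? (t : Int)
      = some L[t] := by
  apply PySem.Dict.get?_of_mem_items
  · rw [pvRev_items L h, PySem.List.mem_enumerate_iff]
    exact ⟨t, ht, by simp⟩
  · simp only [PySem.Dict.keys, pvRev_items L h]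
    exact pvEnum_fst_nodup L

lemma pvPick_eq (sk : PySem.Set Char) (l : List Char) (k : Nat) (hk : 1 ≤ k) :
    pvPick sk l k = (l.filter (fun ch => !(PySem.Set.contains sk ch)))[k - 1]? := by
  induction l generalizing k with
  | nil => simp [pvPick]
  | cons ch rest ih =>
    rw [pvPick, List.filter_cons]
    cases hc : PySem.Set.contains sk ch
    · rw [if_neg (show ¬(false = true) by simp), if_pos (show (!false) = true by simp)]
      by_cases h1 : k = 1
      · subst h1
        rw [if_pos (show 1 - 1 = 0 from rfl)]
        rfl
      · rw [if_neg (show ¬(k - 1 = 0) by omega), ih (k - 1) (by omega)]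
        conv_rhs => rw [show k - 1 = (k - 2) + 1 from by omega, List.getElem?_cons_succ]
        rw [show k - 1 - 1 = k - 2 from by omega]
    · rw [if_pos (show true = true from rfl), if_neg (show ¬((!true) = true) by simp)]
      exact ih k hk

lemma pvFilter_drop (p : Char → Bool) (A : List Char) (hA : A.Nodup) (pos i : Nat)
    (hpos : pos < A.length) (hi : i < (A.filter p).length) (h : A[pos] = (A.filter p)[i]) :
    (A.drop (pos + 1)).filter p = (A.filter p).drop (i + 1) := by
  have hp : p A[pos] = true := by
    rw [h]; exact List.of_mem_filter (List.getElem_mem hi)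
  have htake : A.take (pos + 1) = A.take pos ++ [A[pos]] := by
    rw [List.take_add_one, List.getElem?_eq_getElem hpos]; rfl
  have hsplit : A.filter p
      = ((A.take pos).filter p ++ [A[pos]]) ++ (A.drop (pos + 1)).filter p := by
    conv_lhs => rw [← List.take_append_drop (pos + 1) A]
    rw [List.filter_append, htake, List.filter_append]
    simp [hp]
  have hlen : ((A.take pos).filter p).length < (A.filter p).length := by
    rw [hsplit]; simp
  have hidx : (A.filter p)[((A.take pos).filter p).length]'hlen = A[pos] := by
    rw [List.getElem_of_eq hsplit hlen]
    simp
  have hnd : (A.filter p).Nodup := hA.filter p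
  have heq : ((A.take pos).filter p).length = i := by
    have h2 : (A.filter p)[((A.take pos).filter p).length]'hlen = (A.filter p)[i]'hi := by
      rw [hidx, h]
    exact (List.Nodup.getElem_inj_iff hnd).mp h2
  rw [hsplit, heq.symm]
  rw [List.drop_append_of_le_length (by simp)]
  simp

lemma pvRot_get (L : List Char) (i kN : Nat) (hi : i < L.length) (h1 : 1 ≤ kN)
    (hk : kN < L.length) :
    (L.drop (i + 1) ++ L)[kN - 1]? = L[(i + kN) % L.length]? := by
  have hdl : (L.drop (i + 1)).length = L.length - (i + 1) := List.length_drop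
  by_cases hcase : kN - 1 < L.length - (i + 1)
  · rw [List.getElem?_append_left (by omega)]
    rw [List.getElem?_drop]
    have h1' : (i + 1) + (kN - 1) = i + kN := by omega
    have h2' : (i + kN) % L.length = i + kN := Nat.mod_eq_of_lt (by omega)
    rw [h1', h2']
  · rw [List.getElem?_append_right (by omega)]
    have h2' : (i + kN) % L.length = i + kN - L.length := by
      rw [Nat.mod_eq_sub_mod (by omega), Nat.mod_eq_of_lt (by omega)]
    have h1' : kN - 1 - (L.drop (i + 1)).length = i + kN - L.length := by omega
    rw [h1', h2']

lemma pvMod_toNat_lt (a m : Int) (hm : 0 < m) : (PySem.Int.mod a m).toNat < m.toNat := by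
  have h1 := PySem.Int.mod_nonneg a hm
  have h2 := PySem.Int.mod_lt a hm
  omega

-- the per-character equality of the two loop bodies
lemma pvChar (skip : String) (index : Int) (c : Char)
    (hcAZ : c ∈ pvAZ) (hns : c ∉ skip.toList) (acc : List Char) :
    ((((PySem.List.enumerate (PySem.List.sorted (PySem.Set.diff (PySem.Set.ofList pvAZ) (PySem.Set.ofList skip.toList)) (fun c => c) false) 0).foldl (fun d p => d.insert p.2 p.1) PySem.Dict.empty).get? c).elim acc (fun i =>
      (((((PySem.List.enumerate (PySem.List.sorted (PySem.Set.diff (PySem.Set.ofList pvAZ) (PySem.Set.ofList skip.toList)) (fun c => c) false) 0).foldl (fun d p => d.insert p.2 p.1) PySem.Dict.empty)).items.foldl (fun d p => d.insert p.2 p.1) PySem.Dict.empty).get?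
          (PySem.Int.mod (i + index) (PySem.Set.len (PySem.Set.diff (PySem.Set.ofList pvAZ) (PySem.Set.ofList skip.toList))))).elim acc
        (fun ch => acc ++ [ch])))
    = ((PySem.List.index? pvAZ c).elim acc (fun pos =>
        if PySem.Int.mod index ((pvAZ.filter (fun ch => !(PySem.Set.contains (PySem.Set.ofList skip.toList) ch))).length : Int) = 0
        then acc ++ [c]
        else
          (pvPick (PySem.Set.ofList skip.toList) (PySem.List.slice (pvAZ ++ pvAZ) (some ((pos + 1 : Nat) : Int)) none)
            (PySem.Int.mod index ((pvAZ.filter (fun ch => !(PySem.Set.contains (PySem.Set.ofList skip.toList) ch))).length : Int)).toNat).elim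
            acc (fun ch => acc ++ [ch]))) := by
  have hfB : pvAZ.filter (fun ch => !(PySem.Set.contains (PySem.Set.ofList skip.toList) ch))
      = pvL skip.toList := List.filter_congr (fun x _ => by rw [pvContains_ofList]; rfl)
  rw [pvAlpha_eq skip.toList, pvSorted_eq skip.toList, hfB]
  set L := pvL skip.toList with hLdef
  have hnd : L.Nodup := pvL_nodup skip.toList
  have hcL : c ∈ L := by
    rw [hLdef, pvL, List.mem_filter]
    exact ⟨hcAZ, by simp [pvP, hns]⟩
  obtain ⟨i, hi, hci⟩ := List.mem_iff_getElem.mp hcL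
  have hm : 0 < L.length := List.length_pos_of_mem hcL
  have hmI : (0 : Int) < (L.length : Int) := by exact_mod_cast hm
  simp only [PySem.Set.len]
  obtain ⟨posI, hidxc⟩ : ∃ j, PySem.List.index? pvAZ c = some j :=
    Option.isSome_iff_exists.mp ((PySem.List.index?_isSome_iff pvAZ c).mpr hcAZ)
  obtain ⟨hposI, hcpI, -⟩ := PySem.List.getElem_of_index?_eq_some hidxc
  rw [hidxc, Option.elim_some]
  have hgd : ((PySem.List.enumerate L 0).foldl (fun d p => d.insert p.2 p.1) PySem.Dict.empty).get? c
      = some (i : Int) := by rw [← hci]; exact pvDic_get L hnd i hi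
  rw [hgd, Option.elim_some]
  set q := PySem.Int.mod ((i : Int) + index) (L.length : Int) with hqdef
  have hq0 : 0 ≤ q := PySem.Int.mod_nonneg _ hmI
  have hqt : q.toNat < L.length := by
    have := pvMod_toNat_lt ((i : Int) + index) (L.length : Int) hmI
    simpa using this
  have hqcast : q = ((q.toNat : Nat) : Int) := (Int.toNat_of_nonneg hq0).symm
  rw [hqcast, pvRev_get L hnd q.toNat hqt, Option.elim_some]
  set k := PySem.Int.mod index (L.length : Int) with hkdef
  have hk0 : 0 ≤ k := PySem.Int.mod_nonneg _ hmI
  have hkl : k < (L.length : Int) := PySem.Int.mod_lt _ hmI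
  have hqe : q = ((i : Int) + index) % (L.length : Int) := by
    rw [hqdef, PySem.Int.mod_eq_emod_of_pos hmI]
  have hke : k = index % (L.length : Int) := by
    rw [hkdef, PySem.Int.mod_eq_emod_of_pos hmI]
  by_cases h0 : k = 0
  · rw [if_pos h0]
    have hdvd : index % (L.length : Int) = 0 := by rw [← hke]; exact h0
    have hmul : (L.length : Int) * (index / (L.length : Int)) = index := by
      have h := Int.mul_ediv_add_emod index (L.length : Int)
      rw [hdvd] at h; linarith
    have e0 : (i : Int) + index
        = (i : Int) + (L.length : Int) * (index / (L.length : Int)) := by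
      conv_lhs => rw [← hmul]
    have hqi : q = (i : Int) := by
      rw [hqe, e0, Int.add_mul_emod_self_left]
      exact Int.emod_eq_of_lt (by positivity) (by exact_mod_cast hi)
    have hti : q.toNat = i := by rw [hqi]; simp
    simp only [hti, hci]
  · rw [if_neg h0]
    set kN := k.toNat with hkN
    have hk1 : 1 ≤ kN := by omega
    have hkm : kN < L.length := by omega
    rw [PySem.List.slice_from_natCast,
      List.drop_append_of_le_length (by omega),
      pvPick_eq _ _ kN hk1, List.filter_append]
    have hfd : (pvAZ.drop (posI + 1)).filter (fun ch => !(PySem.Set.contains (PySem.Set.ofList skip.toList) ch))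
        = L.drop (i + 1) := by
      rw [List.filter_congr (fun x _ => by rw [pvContains_ofList])]
      exact pvFilter_drop (pvP skip.toList) pvAZ pvAZ_nodup posI i hposI hi
        (by rw [hcpI]; exact hci.symm)
    rw [hfd, hfB, pvRot_get L i kN hi hk1 hkm]
    have hkc : ((kN : Nat) : Int) = k := Int.toNat_of_nonneg hk0
    have hmul : index = (L.length : Int) * (index / (L.length : Int)) + k := by
      rw [hke]; exact (Int.mul_ediv_add_emod index (L.length : Int)).symm
    have hsplitIdx : (i : Int) + index
        = ((i : Int) + k) + (L.length : Int) * (index / (L.length : Int)) := by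
      conv_lhs => rw [hmul]
      ring
    have h1 : q = ((i : Int) + (kN : Int)) % (L.length : Int) := by
      rw [hqe, hsplitIdx, Int.add_mul_emod_self_left, hkc]
    have h2 : q = (((i + kN) % L.length : Nat) : Int) := by
      rw [h1]; push_cast; rfl
    have htq : q.toNat = (i + kN) % L.length := by rw [h2]; exact Int.toNat_natCast _
    rw [← htq, List.getElem?_eq_getElem hqt, Option.elim_some]

-- ===== VERDICT (by name: the statement is the Claim_ definition above) =====
theorem solution_spec : Claim_equal_solution := by
  intro s skip index _hdom hpre
  unfold Spec_solution solution solution_alt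
  simp only []
  congr 1
  apply PySem.List.foldl_congr_mem
  intro acc c hc
  have h := List.all_eq_true.mp hpre c hc
  simp only [Bool.and_eq_true, Bool.not_eq_true'] at h
  exact pvChar skip index c (by simpa using h.1) (by simpa using h.2) acc
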